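-- pv_equiv track=rewrite | github.com/tiendm1991/python | leetcode/contest/weekly-214/Contest4.py | createSortedArray_bisearch
-- ===== SOURCE A (Python) =====
-- import bisect
--
-- def createSortedArray_bisearch(instructions) -> int:
--     mod = 10 ** 9 + 7
--     nums = []
--     n = len(instructions)
--     if n < 2:
--         return 0
--
--     def insert(x):
--         left, right = bisect.bisect_left(nums, x), len(nums) - bisect.bisect_right(nums, x)
--         bisect.insort(nums, x)
--         return min(left, right)
--
--     ans = 0
--     for x in instructions:
--         if not nums:
--             nums = [x]
--             continue
--         ans = (ans + insert(x)) % mod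
--     return ans
-- ===== SOURCE B (Python) =====
-- def createSortedArray_bisearch(instructions) -> int:
--     mod = 10 ** 9 + 7
--     ans = 0
--     seen = []
--     for x in instructions:
--         less = 0
--         greater = 0
--         for y in seen:
--             if y < x:
--                 less += 1
--             elif y > x:
--                 greater += 1
--         ans = (ans + min(less, greater)) % mod
--         seen.append(x)
--     return ans
-- ===== Notes on version B (the rewrite author's own statement) =====
-- stated objective: simpler
-- what changed: B keeps the raw prefix of already-processed elements and counts smaller/greater elements with one linear scan per insertion, instead of maintaining a sorted array with binary searches and insort; the n<2 early return disappears.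
import Mathlib
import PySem

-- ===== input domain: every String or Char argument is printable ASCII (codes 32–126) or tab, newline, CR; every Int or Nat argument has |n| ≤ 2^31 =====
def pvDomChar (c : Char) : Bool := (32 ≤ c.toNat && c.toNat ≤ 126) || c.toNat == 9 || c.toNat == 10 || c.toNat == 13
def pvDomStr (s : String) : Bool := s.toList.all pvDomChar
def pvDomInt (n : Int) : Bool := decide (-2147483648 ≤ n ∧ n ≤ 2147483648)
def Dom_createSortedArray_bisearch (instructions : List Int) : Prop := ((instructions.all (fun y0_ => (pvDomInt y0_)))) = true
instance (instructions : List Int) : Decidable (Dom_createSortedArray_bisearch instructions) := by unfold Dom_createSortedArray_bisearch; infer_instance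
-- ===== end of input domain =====

-- ===== PORT A =====
-- B changes the data structure: it counts smaller/greater elements by a linear scan over the
-- raw unsorted prefix instead of maintaining a sorted array with binary searches; same O(n^2) cost.
-- (A mutates no argument; equivalence is about the return value, both ports are pure.)

-- port of bisect.bisect_left: number of elements < x; exact on sorted lists, and `numsA` below
-- is always sorted (it is built by insort only).
def pvBisectLeft (l : List Int) (x : Int) : Int :=
  (l.countP (fun y => decide (y < x)) : Int)

-- port of bisect.bisect_right: number of elements ≤ x; exact on sorted lists (see above).
def pvBisectRight (l : List Int) (x : Int) : Int :=
  (l.countP (fun y => decide (y ≤ x)) : Int)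

-- port of bisect.insort: insert x after all equal elements, keeping the list sorted
def pvInsort (l : List Int) (x : Int) : List Int :=
  match l with
  | [] => [x]
  | y :: ys => if x < y then x :: y :: ys else y :: pvInsort ys x

-- one iteration of A's `for x in instructions` loop, state = (nums, ans)
def pvStepA (st : List Int × Int) (x : Int) : List Int × Int :=
  match st with
  | (nums, ans) =>
    if nums = [] then ([x], ans)
    else
      let left := pvBisectLeft nums x
      let right := (nums.length : Int) - pvBisectRight nums x
      (pvInsort nums x, (ans + min left right) % 1000000007)

def createSortedArray_bisearch (instructions : List Int) : Int :=
  if instructions.length < 2 then 0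
  else (instructions.foldl pvStepA ([], 0)).2

-- ===== PORT B =====
-- one iteration of B's loop, state = (seen, ans)
def pvStepB (st : List Int × Int) (x : Int) : List Int × Int :=
  match st with
  | (seen, ans) =>
    let less := (seen.countP (fun y => decide (y < x)) : Int)
    let greater := (seen.countP (fun y => decide (x < y)) : Int)
    (seen ++ [x], (ans + min less greater) % 1000000007)

def createSortedArray_bisearch_alt (instructions : List Int) : Int :=
  (instructions.foldl pvStepB ([], 0)).2

-- ===== PRECONDITION & SPEC =====
def Spec_createSortedArray_bisearch (instructions : List Int) (out : Int) : Prop := out = createSortedArray_bisearch_alt instructions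
instance (instructions : List Int) (out : Int) : Decidable (Spec_createSortedArray_bisearch instructions out) := by unfold Spec_createSortedArray_bisearch; infer_instance

-- ===== CLAIM (what is proved, stated in full; the proofs are below) =====
def Claim_equal_createSortedArray_bisearch : Prop := ∀ (instructions : List Int), Dom_createSortedArray_bisearch instructions → Spec_createSortedArray_bisearch instructions (createSortedArray_bisearch instructions)

-- ===== LEMMAS AND PROOFS =====

theorem pvInsort_perm (l : List Int) (x : Int) : (pvInsort l x).Perm (x :: l) := by
  induction l with
  | nil => simp [pvInsort]
  | cons y ys ih =>
    simp only [pvInsort]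
    split
    · exact List.Perm.refl _
    · exact (List.Perm.cons y ih).trans (List.Perm.swap x y ys)

theorem pv_right_eq (nums : List Int) (x : Int) :
    (nums.length : Int) - pvBisectRight nums x = (nums.countP (fun y => decide (x < y)) : Int) := by
  unfold pvBisectRight
  have h : nums.length = nums.countP (fun y => decide (y ≤ x)) + nums.countP (fun y => decide (x < y)) := by
    induction nums with
    | nil => simp
    | cons a as ih =>
      by_cases hax : a ≤ x
      · simp [hax, not_lt.mpr hax]; omega
      · simp [hax, lt_of_not_ge hax]; omega
  omega

theorem pv_fold_eq (l : List Int) (nums seen : List Int) (ans : Int)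
    (hperm : nums.Perm seen) (hans : ans % 1000000007 = ans) :
    (l.foldl pvStepA (nums, ans)).2 = (l.foldl pvStepB (seen, ans)).2 := by
  induction l generalizing nums seen ans with
  | nil => simp
  | cons x xs ih =>
    simp only [List.foldl_cons]
    by_cases hnil : nums = []
    · have hseen : seen = [] := by
        subst hnil
        exact hperm.nil_eq.symm
      subst hnil hseen
      have : pvStepB (([] : List Int), ans) x = ([x], ans) := by
        simp [pvStepB, hans]
      rw [this]
      simp only [pvStepA, reduceIte]
      exact ih [x] [x] ans (List.Perm.refl _) hans
    · have hstepA : pvStepA (nums, ans) x =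
          (pvInsort nums x,
           (ans + min (pvBisectLeft nums x) ((nums.length : Int) - pvBisectRight nums x)) % 1000000007) := by
        simp [pvStepA, hnil]
      have hless : pvBisectLeft nums x = (seen.countP (fun y => decide (y < x)) : Int) := by
        unfold pvBisectLeft
        rw [hperm.countP_eq]
      have hgreater : (nums.length : Int) - pvBisectRight nums x
          = (seen.countP (fun y => decide (x < y)) : Int) := by
        rw [pv_right_eq]
        rw [hperm.countP_eq]
      rw [hstepA]
      simp only [pvStepB]
      rw [hless, hgreater]
      apply ih
      · exact (pvInsort_perm nums x).trans ((hperm.cons x).trans (List.perm_append_singleton x seen).symm)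
      · exact Int.emod_emod_of_dvd _ dvd_rfl

theorem pv_alt_nil : createSortedArray_bisearch_alt [] = 0 := by
  simp [createSortedArray_bisearch_alt]

theorem pv_alt_single (x : Int) : createSortedArray_bisearch_alt [x] = 0 := by
  simp [createSortedArray_bisearch_alt, pvStepB]

-- ===== VERDICT (by name: the statement is the Claim_ definition above) =====
theorem createSortedArray_bisearch_spec : Claim_equal_createSortedArray_bisearch := by
  intro instructions _
  unfold Spec_createSortedArray_bisearch createSortedArray_bisearch
  split
  · match instructions, ‹instructions.length < 2› with
    | [], _ => exact pv_alt_nil.symm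
    | [x], _ => exact (pv_alt_single x).symm
  · unfold createSortedArray_bisearch_alt
    exact pv_fold_eq instructions [] [] 0 (List.Perm.refl _) rfl
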